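-- pv_equiv track=rewrite | github.com/jloutey-hash/geovac | debug/br_a_breit_angular.py | rank_list_SOO
-- ===== SOURCE A (Python) =====
-- from typing import Dict, FrozenSet, List, Set, Tuple
--
-- def rank_list_SOO(l_max: int) -> List[Tuple[int, int]]:
--     """The spin-other-orbit piece has structure
--        (grad 1/r_12) . (ell_1 sigma_2 + ell_2 sigma_1 + ...)
--
--     The orbital operator (grad 1/r_12) carries spatial rank 1 per "leg";
--     after multipole expansion the bipolar structure is
--        (L1, L2) with triangle(L1, L2, 1) and (L1 + L2) odd,
--     i.e. (L1, L2) in {(0,1), (1,0), (1,2), (2,1), (2,3), ...}.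
--
--     Overall coupling rank K_overall = 1 (rank of each spin operator).
--     """
--     pairs: List[Tuple[int, int]] = []
--     Lmax = 2 * l_max + 2
--     for L1 in range(Lmax + 1):
--         for L2 in range(Lmax + 1):
--             if abs(L1 - L2) > 1 or L1 + L2 < 1:
--                 continue
--             if (L1 + L2) % 2 != 1:
--                 continue
--             pairs.append((L1, L2))
--     return pairs
-- ===== SOURCE B (Python) =====
-- from typing import List, Tuple
--
-- def rank_list_SOO(l_max: int) -> List[Tuple[int, int]]:
--     """Emit the neighbouring pairs (L1, L1-1) and (L1, L1+1) directly:
--     the constraints triangle(L1,L2,1) + odd sum mean L2 = L1 +/- 1."""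
--     Lmax = 2 * l_max + 2
--     pairs: List[Tuple[int, int]] = []
--     for L1 in range(Lmax + 1):
--         if L1 > 0:
--             pairs.append((L1, L1 - 1))
--         if L1 < Lmax:
--             pairs.append((L1, L1 + 1))
--     return pairs
-- ===== Notes on version B (the rewrite author's own statement) =====
-- stated objective: faster
-- what changed: Instead of scanning all (L1,L2) pairs in a nested loop and filtering by |L1-L2|<=1 and odd sum, B emits the only possible neighbours (L1,L1-1) and (L1,L1+1) directly in a single pass.
import Mathlib
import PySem

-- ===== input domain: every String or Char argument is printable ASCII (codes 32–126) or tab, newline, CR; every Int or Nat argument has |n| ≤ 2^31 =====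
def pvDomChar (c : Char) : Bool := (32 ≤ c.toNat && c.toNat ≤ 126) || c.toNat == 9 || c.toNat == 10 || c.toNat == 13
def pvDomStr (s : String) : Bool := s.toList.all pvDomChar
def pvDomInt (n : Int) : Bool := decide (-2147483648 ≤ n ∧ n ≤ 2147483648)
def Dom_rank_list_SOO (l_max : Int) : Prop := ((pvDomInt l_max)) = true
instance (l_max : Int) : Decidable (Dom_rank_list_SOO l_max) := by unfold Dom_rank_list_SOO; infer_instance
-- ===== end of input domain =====

-- ===== PORT A =====
-- B replaces A's filtered nested scan by directly emitting the neighbour pairs per L1 (faster).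
def rank_list_SOO (l_max : Int) : List (Int × Int) :=
  let Lmax := 2 * l_max + 2
  (PySem.List.pyRange 0 (Lmax + 1) 1).foldl (fun pairs L1 =>
    (PySem.List.pyRange 0 (Lmax + 1) 1).foldl (fun pairs L2 =>
      if (L1 - L2).natAbs > 1 ∨ L1 + L2 < 1 then pairs
      else if PySem.Int.mod (L1 + L2) 2 ≠ 1 then pairs
      else pairs ++ [(L1, L2)]) pairs) []

-- ===== PORT B =====
def rank_list_SOO_alt (l_max : Int) : List (Int × Int) :=
  let Lmax := 2 * l_max + 2
  (PySem.List.pyRange 0 (Lmax + 1) 1).foldl (fun pairs L1 =>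
    let pairs := if L1 > 0 then pairs ++ [(L1, L1 - 1)] else pairs
    if L1 < Lmax then pairs ++ [(L1, L1 + 1)] else pairs) []

-- ===== PRECONDITION & SPEC =====
def Spec_rank_list_SOO (l_max : Int) (out : List (Int × Int)) : Prop := out = rank_list_SOO_alt l_max
instance (l_max : Int) (out : List (Int × Int)) : Decidable (Spec_rank_list_SOO l_max out) := by unfold Spec_rank_list_SOO; infer_instance

-- ===== CLAIM (what is proved, stated in full; the proofs are below) =====
def Claim_equal_rank_list_SOO : Prop := ∀ (l_max : Int), Dom_rank_list_SOO l_max → Spec_rank_list_SOO l_max (rank_list_SOO l_max)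

-- ===== LEMMAS AND PROOFS =====

-- ===== VERDICT (by name: the statement is the Claim_ definition above) =====
-- The inner-loop filter predicate of A, as a Bool.
def pA (_Lmax L1 L2 : Int) : Bool :=
  !(decide ((L1 - L2).natAbs > 1 ∨ L1 + L2 < 1)) && !(decide (PySem.Int.mod (L1 + L2) 2 ≠ 1))

lemma stepA_eq (Lmax L1 : Int) :
    (fun (pairs : List (Int × Int)) L2 =>
      if (L1 - L2).natAbs > 1 ∨ L1 + L2 < 1 then pairs
      else if PySem.Int.mod (L1 + L2) 2 ≠ 1 then pairs
      else pairs ++ [(L1, L2)])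
    = (fun pairs L2 => if pA Lmax L1 L2 then pairs ++ [(L1, L2)] else pairs) := by
  funext pairs L2
  simp only [pA]
  split_ifs with h1 h2 h3 <;> simp_all

lemma mod_two_add_one (L1 : Int) : PySem.Int.mod (L1 + (L1 + 1)) 2 = 1 := by
  simp [PySem.Int.mod, Int.fmod_eq_emod]; omega

lemma mod_two_sub_one (L1 : Int) : PySem.Int.mod (L1 + (L1 - 1)) 2 = 1 := by
  simp [PySem.Int.mod, Int.fmod_eq_emod]; omega

lemma mod_two_self (L1 : Int) : PySem.Int.mod (L1 + L1) 2 = 0 := by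
  simp [PySem.Int.mod, Int.fmod_eq_emod]; omega

lemma pA_iff (Lmax L1 L2 : Int) (h0 : 0 ≤ L1) :
    pA Lmax L1 L2 = true ↔ ((L2 = L1 - 1 ∧ 1 ≤ L1) ∨ L2 = L1 + 1) := by
  simp only [pA, Bool.and_eq_true, Bool.not_eq_true', decide_eq_false_iff_not, not_or, not_lt,
    not_not]
  constructor
  · rintro ⟨⟨habs, hsum⟩, hmod⟩
    have h3 : L2 = L1 - 1 ∨ L2 = L1 ∨ L2 = L1 + 1 := by omega
    rcases h3 with h | h | h
    · exact Or.inl ⟨h, by omega⟩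
    · exfalso; subst h; rw [mod_two_self] at hmod; omega
    · exact Or.inr h
  · rintro (⟨h, hL⟩ | h) <;> subst h
    · exact ⟨⟨by omega, by omega⟩, by rw [mod_two_sub_one]⟩
    · exact ⟨⟨by omega, by omega⟩, by rw [mod_two_add_one]⟩

lemma filter_nil (a b : Int) (p : Int → Bool)
    (hp : ∀ x, a ≤ x → x < b → p x = false) :
    (PySem.List.pyRange a b 1).filter p = [] := by
  rw [List.filter_eq_nil_iff]
  intro x hx
  rw [PySem.List.mem_pyRange_one] at hx
  simp [hp x hx.1 hx.2]

lemma filter_singleton (a b c : Int) (ha : a ≤ c) (hc : c < b) (p : Int → Bool)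
    (hpc : p c = true)
    (hp : ∀ x, a ≤ x → x < b → p x = true → x = c) :
    (PySem.List.pyRange a b 1).filter p = [c] := by
  rw [PySem.List.pyRange_one_append a c b ha (by omega), List.filter_append,
    PySem.List.pyRange_one_cons (by omega : c < b)]
  rw [filter_nil a c p (fun x h1 h2 => by
    by_contra hne
    have := hp x h1 (by omega) (by simpa using hne)
    omega)]
  rw [List.filter_cons_of_pos hpc,
    filter_nil (c+1) b p (fun x h1 h2 => by
      by_contra hne
      have := hp x (by omega) h2 (by simpa using hne)
      omega)]
  simp

lemma inner_filter (Lmax L1 : Int) (h0 : 0 ≤ L1) (hL : L1 ≤ Lmax) :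
    (PySem.List.pyRange 0 (Lmax + 1) 1).filter (pA Lmax L1)
      = (if 0 < L1 then [L1 - 1] else []) ++ (if L1 < Lmax then [L1 + 1] else []) := by
  rw [PySem.List.pyRange_one_append 0 L1 (Lmax + 1) h0 (by omega), List.filter_append]
  have hleft : (PySem.List.pyRange 0 L1 1).filter (pA Lmax L1)
      = (if 0 < L1 then [L1 - 1] else []) := by
    split_ifs with h
    · exact filter_singleton 0 L1 (L1 - 1) (by omega) (by omega) _
        ((pA_iff Lmax L1 (L1-1) h0).2 (Or.inl ⟨rfl, by omega⟩))
        (fun x h1 h2 hx => by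
          rcases (pA_iff Lmax L1 x h0).1 hx with ⟨h3, _⟩ | h3 <;> omega)
    · exact filter_nil 0 L1 _ (fun x h1 h2 => by
        by_contra hne
        rcases (pA_iff Lmax L1 x h0).1 (by simpa using hne) with ⟨h3, h4⟩ | h3 <;> omega)
  have hright : (PySem.List.pyRange L1 (Lmax + 1) 1).filter (pA Lmax L1)
      = (if L1 < Lmax then [L1 + 1] else []) := by
    split_ifs with h
    · exact filter_singleton L1 (Lmax + 1) (L1 + 1) (by omega) (by omega) _
        ((pA_iff Lmax L1 (L1+1) h0).2 (Or.inr rfl))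
        (fun x h1 h2 hx => by
          rcases (pA_iff Lmax L1 x h0).1 hx with ⟨h3, h4⟩ | h3 <;> omega)
    · exact filter_nil L1 (Lmax + 1) _ (fun x h1 h2 => by
        by_contra hne
        rcases (pA_iff Lmax L1 x h0).1 (by simpa using hne) with ⟨h3, h4⟩ | h3 <;> omega)
  rw [hleft, hright]

lemma inner_eq (Lmax L1 : Int) (acc : List (Int × Int)) (h0 : 0 ≤ L1) (hL : L1 ≤ Lmax) :
    ((PySem.List.pyRange 0 (Lmax + 1) 1).foldl (fun pairs L2 =>
      if (L1 - L2).natAbs > 1 ∨ L1 + L2 < 1 then pairs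
      else if PySem.Int.mod (L1 + L2) 2 ≠ 1 then pairs
      else pairs ++ [(L1, L2)]) acc)
    = (let pairs := if L1 > 0 then acc ++ [(L1, L1 - 1)] else acc
       if L1 < Lmax then pairs ++ [(L1, L1 + 1)] else pairs) := by
  rw [stepA_eq Lmax L1, PySem.List.foldl_append_if, inner_filter Lmax L1 h0 hL]
  split_ifs <;> simp

theorem rank_list_SOO_spec : Claim_equal_rank_list_SOO := by
  intro l_max _
  unfold Spec_rank_list_SOO rank_list_SOO rank_list_SOO_alt
  apply PySem.List.foldl_congr_mem
  intro acc L1 hmem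
  rw [PySem.List.mem_pyRange_one] at hmem
  exact inner_eq (2 * l_max + 2) L1 acc hmem.1 (by omega)
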